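-- pv_equiv track=rewrite | github.com/ryokbys/nap | nappy/fitpot/fp2prms.py | sort_pairs
-- ===== SOURCE A (Python) =====
-- def sort_pairs(pairs,specorder):
--
--     sorted_pairs = []
--     for i in range(len(specorder)):
--         si = specorder[i]
--         for j in range(i,len(specorder)):
--             sj = specorder[j]
--             if same_pair_exists((si,sj),pairs):
--                 sorted_pairs.append((si,sj))
--     return sorted_pairs
--
-- def same_pair(pair1,pair2):
--     a1,a2 = pair1
--     b1,b2 = pair2
--     if (a1==b1 and a2==b2) or (a1==b2 and a2==b1):
--         return True
--     else:
--         return False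
--
-- def same_pair_exists(pair,pairs):
--     for p in pairs:
--         if same_pair(p,pair):
--             return True
--     return False
-- ===== SOURCE B (Python) =====
-- def sort_pairs(pairs, specorder):
--     occ = {}
--     for i, s in enumerate(specorder):
--         occ.setdefault(s, []).append(i)
--     idx = set()
--     for a, b in pairs:
--         if a in occ and b in occ:
--             for i in occ[a]:
--                 for j in occ[b]:
--                     idx.add((i, j) if i <= j else (j, i))
--     return [(specorder[i], specorder[j]) for i, j in sorted(idx)]
-- ===== Notes on version B (the rewrite author's own statement) =====
-- stated objective: faster
-- what changed: Instead of scanning the whole pairs list once for every ordered species-index pair (i,j) of specorder, B builds an occurrence map species->indices in one pass, turns each input pair into its normalized index pairs collected in a set, and sorts that set once.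
import Mathlib
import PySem

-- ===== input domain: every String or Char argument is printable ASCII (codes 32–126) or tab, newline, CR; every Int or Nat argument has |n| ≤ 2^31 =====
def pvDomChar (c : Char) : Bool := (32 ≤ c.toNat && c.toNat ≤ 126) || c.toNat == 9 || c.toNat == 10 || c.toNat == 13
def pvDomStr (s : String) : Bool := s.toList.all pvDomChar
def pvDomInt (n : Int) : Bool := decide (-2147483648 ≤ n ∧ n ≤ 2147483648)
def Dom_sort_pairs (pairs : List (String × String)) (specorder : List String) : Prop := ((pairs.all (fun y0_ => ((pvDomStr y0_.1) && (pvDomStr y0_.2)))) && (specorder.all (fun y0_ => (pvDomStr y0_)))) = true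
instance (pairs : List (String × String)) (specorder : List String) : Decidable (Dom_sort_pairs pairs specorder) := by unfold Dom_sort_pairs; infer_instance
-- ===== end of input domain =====

-- B replaces A's scan of the whole pairs list for every ordered index pair of specorder by one
-- occurrence map over specorder, one pass over pairs collecting normalized index pairs in a set,
-- and a single sort of that set; the return values agree on every input.

-- ===== PORT A =====
def same_pair (pair1 pair2 : String × String) : Bool :=
  if (pair1.1 == pair2.1 && pair1.2 == pair2.2) || (pair1.1 == pair2.2 && pair1.2 == pair2.1)
  then true else false

def same_pair_exists (pair : String × String) (pairs : List (String × String)) : Bool :=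
  pairs.any (fun p => same_pair p pair)

def sort_pairs (pairs : List (String × String)) (specorder : List String) : List (String × String) :=
  (PySem.List.pyRange 0 (specorder.length : Int) 1).foldl (fun acc i =>
    let si := PySem.List.pyGetD specorder i ""
    (PySem.List.pyRange i (specorder.length : Int) 1).foldl (fun acc2 j =>
      let sj := PySem.List.pyGetD specorder j ""
      if same_pair_exists (si, sj) pairs then acc2 ++ [(si, sj)] else acc2) acc) []

-- ===== PORT B =====
def sort_pairs_alt (pairs : List (String × String)) (specorder : List String) : List (String × String) :=
  let occ : PySem.Dict String (List Int) :=
    (PySem.List.enumerate specorder).foldl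
      (fun d p => d.modify p.2 [] (fun l => l ++ [p.1])) PySem.Dict.empty
  let idx : PySem.Set (Int × Int) :=
    pairs.foldl (fun st p =>
      if occ.contains p.1 && occ.contains p.2 then
        (occ.getD p.1 []).foldl (fun st1 i =>
          (occ.getD p.2 []).foldl (fun st2 j =>
            st2.add (if i ≤ j then (i, j) else (j, i))) st1) st
      else st) PySem.Set.empty
  (PySem.List.sorted2 idx (fun q => q.1) (fun q => q.2)).map
    (fun q => (PySem.List.pyGetD specorder q.1 "", PySem.List.pyGetD specorder q.2 ""))

-- ===== PRECONDITION & SPEC =====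
def Spec_sort_pairs (pairs : List (String × String)) (specorder : List String) (out : List (String × String)) : Prop := out = sort_pairs_alt pairs specorder
instance (pairs : List (String × String)) (specorder : List String) (out : List (String × String)) : Decidable (Spec_sort_pairs pairs specorder out) := by unfold Spec_sort_pairs; infer_instance

-- ===== CLAIM (what is proved, stated in full; the proofs are below) =====
def Claim_equal_sort_pairs : Prop := ∀ (pairs : List (String × String)) (specorder : List String), Dom_sort_pairs pairs specorder → Spec_sort_pairs pairs specorder (sort_pairs pairs specorder)

-- ===== LEMMAS AND PROOFS =====
def pvS (specorder : List String) (i : Int) : String := PySem.List.pyGetD specorder i ""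
def pvQ (pairs : List (String × String)) (specorder : List String) (i j : Int) : Bool :=
  same_pair_exists (pvS specorder i, pvS specorder j) pairs
def pvJ (pairs : List (String × String)) (specorder : List String) : List (Int × Int) :=
  (PySem.List.pyRange 0 (specorder.length : Int) 1).flatMap (fun i =>
    ((PySem.List.pyRange i (specorder.length : Int) 1).filter (fun j => pvQ pairs specorder i j)).map (fun j => (i, j)))

theorem sort_pairs_eq_map (pairs : List (String × String)) (specorder : List String) :
    sort_pairs pairs specorder = (pvJ pairs specorder).map (fun q => (pvS specorder q.1, pvS specorder q.2)) := by
  unfold sort_pairs pvJ pvQ pvS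
  simp only [PySem.List.foldl_append_if, PySem.List.foldl_append_eq_flatMap]
  simp [List.map_flatMap, List.map_map, Function.comp_def]

-- occ characterization
theorem occ_getD (specorder : List String) (a : String) :
    ((PySem.List.enumerate specorder).foldl
      (fun d p => d.modify p.2 [] (fun l => l ++ [p.1])) PySem.Dict.empty).getD a []
    = ((PySem.List.enumerate specorder).filter (fun p => p.2 == a)).map (fun p => p.1) := by
  have h := PySem.Dict.getD_foldl_modify_append ((PySem.List.enumerate specorder).map Prod.swap)
    (PySem.Dict.empty (κ := String) (ν := List Int)) a
  rw [List.foldl_map] at h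
  simp only [Prod.swap, List.filter_map, List.map_map] at h
  simpa [Function.comp_def] using h

theorem mem_occ_getD (specorder : List String) (a : String) (i : Int) :
    i ∈ ((PySem.List.enumerate specorder).foldl
      (fun d p => d.modify p.2 [] (fun l => l ++ [p.1])) PySem.Dict.empty).getD a []
    ↔ 0 ≤ i ∧ i < (specorder.length : Int) ∧ pvS specorder i = a := by
  rw [occ_getD]
  simp only [List.mem_map, List.mem_filter, PySem.List.mem_enumerate_iff]
  constructor
  · rintro ⟨p, ⟨⟨k, hk, rfl⟩, hpa⟩, rfl⟩
    simp only [beq_iff_eq] at hpa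
    refine ⟨by push_cast; omega, by push_cast; omega, ?_⟩
    simp only [pvS, zero_add]
    rw [PySem.List.pyGetD_natCast]
    simpa [hk] using hpa
  · rintro ⟨h0, hn, hs⟩
    have hk : i.toNat < specorder.length := by omega
    refine ⟨((i : Int), specorder[i.toNat]), ⟨⟨i.toNat, hk, by simp; omega⟩, ?_⟩, by simp⟩
    simp only [beq_iff_eq]
    rw [← hs]
    simp only [pvS]
    rw [PySem.List.pyGetD_eq_getElem specorder "" h0 hn]

theorem occ_contains (specorder : List String) (a : String) :
    ((PySem.List.enumerate specorder).foldl
      (fun d p => d.modify p.2 [] (fun l => l ++ [p.1])) PySem.Dict.empty).contains a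
    = specorder.contains a := by
  have h := PySem.Dict.keys_foldl_modify_key (PySem.List.enumerate specorder)
    (fun p => p.2) ([] : List Int) (fun _ p => fun l => l ++ [p.1]) PySem.Dict.empty
  have hc := PySem.Dict.contains_iff_mem_keys (d := (PySem.List.enumerate specorder).foldl
      (fun d p => d.modify p.2 [] (fun l => l ++ [p.1])) PySem.Dict.empty) (k := a)
  rw [Bool.eq_iff_iff]
  rw [hc, h]
  have he : (PySem.Dict.empty : PySem.Dict String (List Int)).keys = [] := by
    simp [PySem.Dict.keys, PySem.Dict.empty]
  rw [he, PySem.List.map_snd_enumerate]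
  show a ∈ PySem.Set.ofList specorder ↔ _
  simp [PySem.Set.mem_ofList]

-- generic Set-fold lemmas
theorem mem_foldl_add {α β : Type} [BEq β] [LawfulBEq β] (g : α → β) (l : List α)
    (st : PySem.Set β) (x : β) :
    x ∈ l.foldl (fun st a => PySem.Set.add st (g a)) st ↔ x ∈ st ∨ ∃ a ∈ l, x = g a := by
  induction l generalizing st with
  | nil => simp
  | cons b t ih => simp [ih, PySem.Set.mem_add]; tauto

theorem nodup_foldl_add {α β : Type} [BEq β] [LawfulBEq β] (g : α → β) (l : List α)
    (st : PySem.Set β) (h : st.Nodup) :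
    (l.foldl (fun st a => PySem.Set.add st (g a)) st).Nodup := by
  induction l generalizing st with
  | nil => exact h
  | cons b t ih => exact ih _ (PySem.Set.nodup_add _ _ h)

def pvNorm (i j : Int) : Int × Int := if i ≤ j then (i, j) else (j, i)

theorem mem_dfold (l1 l2 : List Int) (st : PySem.Set (Int × Int)) (x : Int × Int) :
    x ∈ l1.foldl (fun st1 i => l2.foldl (fun st2 j =>
        PySem.Set.add st2 (if i ≤ j then (i, j) else (j, i))) st1) st
    ↔ x ∈ st ∨ ∃ i ∈ l1, ∃ j ∈ l2, x = pvNorm i j := by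
  induction l1 generalizing st with
  | nil => simp
  | cons b t ih =>
    simp only [List.foldl_cons, ih, mem_foldl_add (fun j => if b ≤ j then (b, j) else (j, b)) l2 st x]
    simp only [List.mem_cons, pvNorm]
    constructor
    · rintro ((h | ⟨j, hj, hx⟩) | ⟨i, hi, hr⟩)
      · exact Or.inl h
      · exact Or.inr ⟨b, Or.inl rfl, j, hj, hx⟩
      · exact Or.inr ⟨i, Or.inr hi, hr⟩
    · rintro (h | ⟨i, (rfl | hi), hr⟩)
      · exact Or.inl (Or.inl h)
      · exact Or.inl (Or.inr hr)
      · exact Or.inr ⟨i, hi, hr⟩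

theorem nodup_dfold (l1 l2 : List Int) (st : PySem.Set (Int × Int)) (h : st.Nodup) :
    (l1.foldl (fun st1 i => l2.foldl (fun st2 j =>
        PySem.Set.add st2 (if i ≤ j then (i, j) else (j, i))) st1) st).Nodup := by
  induction l1 generalizing st with
  | nil => exact h
  | cons b t ih => exact ih _ (nodup_foldl_add _ l2 st h)

theorem mem_pfold (occ : PySem.Dict String (List Int)) (pairs : List (String × String))
    (st : PySem.Set (Int × Int)) (x : Int × Int) :
    x ∈ pairs.foldl (fun st p =>
      if occ.contains p.1 && occ.contains p.2 then
        (occ.getD p.1 []).foldl (fun st1 i =>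
          (occ.getD p.2 []).foldl (fun st2 j =>
            PySem.Set.add st2 (if i ≤ j then (i, j) else (j, i))) st1) st
      else st) st
    ↔ x ∈ st ∨ ∃ p ∈ pairs, (occ.contains p.1 ∧ occ.contains p.2) ∧
        ∃ i ∈ occ.getD p.1 [], ∃ j ∈ occ.getD p.2 [], x = pvNorm i j := by
  induction pairs generalizing st with
  | nil => simp
  | cons q t ih =>
    simp only [List.foldl_cons]
    split_ifs with hc
    · rw [ih, mem_dfold]
      simp only [Bool.and_eq_true] at hc
      simp only [List.mem_cons]
      constructor
      · rintro ((h | h) | ⟨p, hp, hr⟩)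
        · exact Or.inl h
        · exact Or.inr ⟨q, Or.inl rfl, hc, h⟩
        · exact Or.inr ⟨p, Or.inr hp, hr⟩
      · rintro (h | ⟨p, (rfl | hp), hr⟩)
        · exact Or.inl (Or.inl h)
        · exact Or.inl (Or.inr hr.2)
        · exact Or.inr ⟨p, hp, hr⟩
    · rw [ih]
      simp only [Bool.and_eq_true] at hc
      simp only [List.mem_cons]
      constructor
      · rintro (h | ⟨p, hp, hr⟩)
        · exact Or.inl h
        · exact Or.inr ⟨p, Or.inr hp, hr⟩
      · rintro (h | ⟨p, (rfl | hp), hcc, rest⟩)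
        · exact Or.inl h
        · exact absurd hcc hc
        · exact Or.inr ⟨p, hp, hcc, rest⟩

theorem nodup_pfold (occ : PySem.Dict String (List Int)) (pairs : List (String × String))
    (st : PySem.Set (Int × Int)) (h : st.Nodup) :
    (pairs.foldl (fun st p =>
      if occ.contains p.1 && occ.contains p.2 then
        (occ.getD p.1 []).foldl (fun st1 i =>
          (occ.getD p.2 []).foldl (fun st2 j =>
            PySem.Set.add st2 (if i ≤ j then (i, j) else (j, i))) st1) st
      else st) st).Nodup := by
  induction pairs generalizing st with
  | nil => exact h
  | cons q t ih =>
    simp only [List.foldl_cons]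
    split_ifs with hc
    · exact ih _ (nodup_dfold _ _ _ h)
    · exact ih _ h

theorem sorted2_eq_sorted_lex (xs : List (Int × Int)) :
    PySem.List.sorted2 xs (fun q => q.1) (fun q => q.2)
      = PySem.List.sorted xs (fun q => (toLex (q.1, q.2) : Lex (Int × Int))) := by
  unfold PySem.List.sorted2 PySem.List.sorted
  simp only [if_neg Bool.false_ne_true]
  congr 1
  funext acc x
  congr 1
  funext a b
  by_cases h1 : a.1 < b.1 <;> by_cases h2 : b.1 < a.1 <;> by_cases h3 : a.2 < b.2 <;>
    simp [Prod.Lex.lt_iff, h1, h2, h3] <;> omega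

theorem pvJ_pairwise (pairs : List (String × String)) (specorder : List String) :
    (pvJ pairs specorder).Pairwise (fun a b =>
      (toLex (a.1, a.2) : Lex (Int × Int)) < toLex (b.1, b.2)) := by
  unfold pvJ
  rw [List.pairwise_flatMap]
  constructor
  · intro i _
    refine List.Pairwise.map _ ?_ (List.Pairwise.filter _ (PySem.List.pairwise_lt_pyRange_one i _))
    intro a b hab
    simp [Prod.Lex.lt_iff]
    omega
  · refine List.Pairwise.imp_of_mem ?_ (PySem.List.pairwise_lt_pyRange_one 0 _)
    intro a b _ _ hab x hx y hy
    simp only [List.mem_map, List.mem_filter] at hx hy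
    obtain ⟨j1, _, rfl⟩ := hx
    obtain ⟨j2, _, rfl⟩ := hy
    simp [Prod.Lex.lt_iff]
    omega

theorem pvJ_nodup (pairs : List (String × String)) (specorder : List String) :
    (pvJ pairs specorder).Nodup := by
  have h := pvJ_pairwise pairs specorder
  refine h.imp ?_
  intro a b hab he
  rw [he] at hab
  exact lt_irrefl _ hab

theorem pvJ_mem (pairs : List (String × String)) (specorder : List String) (x : Int × Int) :
    x ∈ pvJ pairs specorder ↔
      0 ≤ x.1 ∧ x.1 ≤ x.2 ∧ x.2 < (specorder.length : Int) ∧ pvQ pairs specorder x.1 x.2 := by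
  unfold pvJ
  simp only [List.mem_flatMap, List.mem_map, List.mem_filter, PySem.List.mem_pyRange_one]
  constructor
  · rintro ⟨i, ⟨h0, hn⟩, j, ⟨⟨hij, hjn⟩, hq⟩, rfl⟩
    exact ⟨h0, hij, hjn, hq⟩
  · rintro ⟨h0, hij, hn, hq⟩
    exact ⟨x.1, ⟨h0, by omega⟩, x.2, ⟨⟨hij, hn⟩, hq⟩, rfl⟩

theorem idx_mem_iff (pairs : List (String × String)) (specorder : List String) (x : Int × Int) :
    x ∈ pairs.foldl (fun st p =>
      if ((PySem.List.enumerate specorder).foldl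
            (fun d p => d.modify p.2 [] (fun l => l ++ [p.1])) PySem.Dict.empty).contains p.1 &&
         ((PySem.List.enumerate specorder).foldl
            (fun d p => d.modify p.2 [] (fun l => l ++ [p.1])) PySem.Dict.empty).contains p.2 then
        (((PySem.List.enumerate specorder).foldl
            (fun d p => d.modify p.2 [] (fun l => l ++ [p.1])) PySem.Dict.empty).getD p.1 []).foldl (fun st1 i =>
          (((PySem.List.enumerate specorder).foldl
            (fun d p => d.modify p.2 [] (fun l => l ++ [p.1])) PySem.Dict.empty).getD p.2 []).foldl (fun st2 j =>
            PySem.Set.add st2 (if i ≤ j then (i, j) else (j, i))) st1) st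
      else st) PySem.Set.empty
    ↔ x ∈ pvJ pairs specorder := by
  rw [mem_pfold, pvJ_mem]
  simp only [PySem.Set.empty, List.not_mem_nil, false_or]
  constructor
  · rintro ⟨p, hp, _, i, hi, j, hj, rfl⟩
    rw [mem_occ_getD] at hi hj
    obtain ⟨hi0, hin, hsi⟩ := hi
    obtain ⟨hj0, hjn, hsj⟩ := hj
    unfold pvNorm
    split_ifs with hij
    · refine ⟨hi0, hij, hjn, ?_⟩
      simp only [pvQ, same_pair_exists, List.any_eq_true]
      refine ⟨p, hp, ?_⟩
      simp [same_pair, hsi, hsj]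
    · refine ⟨hj0, by omega, hin, ?_⟩
      simp only [pvQ, same_pair_exists, List.any_eq_true]
      refine ⟨p, hp, ?_⟩
      simp [same_pair, hsi, hsj]
  · rintro ⟨h0, hij, hn, hq⟩
    simp only [pvQ, same_pair_exists, List.any_eq_true] at hq
    obtain ⟨p, hp, hsp⟩ := hq
    simp only [same_pair] at hsp
    have hmem1 : pvS specorder x.1 ∈ specorder := by
      simp only [pvS]
      exact PySem.List.pyGetD_mem specorder "" ⟨by omega, by omega⟩
    have hmem2 : pvS specorder x.2 ∈ specorder := by
      simp only [pvS]
      exact PySem.List.pyGetD_mem specorder "" ⟨by omega, by omega⟩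
    split_ifs at hsp with hcond
    · simp only [Bool.or_eq_true, Bool.and_eq_true, beq_iff_eq] at hcond
      rcases hcond with ⟨h1, h2⟩ | ⟨h1, h2⟩
      · -- p = (s x.1, s x.2)
        refine ⟨p, hp, ⟨?_, ?_⟩, x.1, ?_, x.2, ?_, ?_⟩
        · rw [occ_contains, h1]; simpa using hmem1
        · rw [occ_contains, h2]; simpa using hmem2
        · rw [mem_occ_getD]; exact ⟨h0, by omega, h1.symm⟩
        · rw [mem_occ_getD]; exact ⟨by omega, hn, h2.symm⟩
        · simp [pvNorm, hij]
      · -- p = (s x.2, s x.1)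
        refine ⟨p, hp, ⟨?_, ?_⟩, x.2, ?_, x.1, ?_, ?_⟩
        · rw [occ_contains, h1]; simpa using hmem2
        · rw [occ_contains, h2]; simpa using hmem1
        · rw [mem_occ_getD]; exact ⟨by omega, hn, h1.symm⟩
        · rw [mem_occ_getD]; exact ⟨h0, by omega, h2.symm⟩
        · simp only [pvNorm]
          split_ifs with h21
          · have h12 : x.1 = x.2 := by omega
            exact Prod.ext_iff.mpr ⟨h12, h12.symm⟩
          · simp

theorem sort_pairs_eq_alt (pairs : List (String × String)) (specorder : List String) :
    sort_pairs pairs specorder = sort_pairs_alt pairs specorder := by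
  rw [sort_pairs_eq_map]
  simp only [sort_pairs_alt]
  rw [sorted2_eq_sorted_lex]
  have hnodup : (pairs.foldl (fun st p =>
      if ((PySem.List.enumerate specorder).foldl
            (fun d p => d.modify p.2 [] (fun l => l ++ [p.1])) PySem.Dict.empty).contains p.1 &&
         ((PySem.List.enumerate specorder).foldl
            (fun d p => d.modify p.2 [] (fun l => l ++ [p.1])) PySem.Dict.empty).contains p.2 then
        (((PySem.List.enumerate specorder).foldl
            (fun d p => d.modify p.2 [] (fun l => l ++ [p.1])) PySem.Dict.empty).getD p.1 []).foldl (fun st1 i =>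
          (((PySem.List.enumerate specorder).foldl
            (fun d p => d.modify p.2 [] (fun l => l ++ [p.1])) PySem.Dict.empty).getD p.2 []).foldl (fun st2 j =>
            PySem.Set.add st2 (if i ≤ j then (i, j) else (j, i))) st1) st
      else st) PySem.Set.empty).Nodup :=
    nodup_pfold _ _ _ (List.nodup_nil)
  have hperm : (pvJ pairs specorder).Perm (pairs.foldl _ PySem.Set.empty) :=
    (List.perm_ext_iff_of_nodup (pvJ_nodup pairs specorder) hnodup).mpr
      (fun a => (idx_mem_iff pairs specorder a).symm)
  rw [PySem.List.sorted_eq_of_perm_of_pairwise_lt _ _ _ hperm (pvJ_pairwise pairs specorder)]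
  rfl

-- ===== VERDICT (by name: the statement is the Claim_ definition above) =====
theorem sort_pairs_spec : Claim_equal_sort_pairs := by
  intro pairs specorder _
  unfold Spec_sort_pairs
  exact sort_pairs_eq_alt pairs specorder
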